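-- pv_equiv track=rewrite | github.com/Teagardan/teagardan | backend/agents/agent.py | determine_relevant_skill
-- ===== SOURCE A (Python) =====
-- def determine_relevant_skill(task: str) -> str:  # Improved skill matching (handles ties)
--     skill_keywords = {  # Updated and expanded skill keywords
--         "web_search": ["search", "find", "lookup", "query", "internet", "google", "information", "research"],
--         "website_rag": ["website", "webpage", "content", "extract", "scrape", "summarization"],
--         "file_system": ["file", "read", "write", "access", "manage", "directory"],
--         "local_rag": ["document", "extract", "text", "data", "parse", "summarize"],
--         "website_expert": ["expert", "knowledge", "specialist", "consult", "opinion"],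
--         "philosophical_reasoning": ["meaning", "life", "existence", "universe", "philosophy"],
--         "general_knowledge": ["what", "who", "where", "when", "why", "how", "explain", "define"], #General knowledge keywords
--         # ... Add keywords for more skills
--     }
--
--     matched_skills = []
--     for skill, keywords in skill_keywords.items():
--         match_count = sum(keyword in task.lower() for keyword in keywords)
--         if match_count > 0:
--             matched_skills.append((skill, match_count))
--
--     if not matched_skills:
--         return None
--
--
--     matched_skills.sort(key=lambda item: item[1], reverse=True) # Sort by match count
--
--
--     if len(matched_skills) > 1 and matched_skills[0][1] == matched_skills[1][1]: #Tie-breaker using priority order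
--         priority_order = list(skill_keywords.keys()) # You can customize the priority
--
--         return next((skill for skill, _ in matched_skills if skill in priority_order), None)  #Returns first match
--
--
--     return matched_skills[0][0]  # Return the highest matching skill
-- ===== SOURCE B (Python) =====
-- def determine_relevant_skill(task: str):
--     skill_keywords = {
--         "web_search": ["search", "find", "lookup", "query", "internet", "google", "information", "research"],
--         "website_rag": ["website", "webpage", "content", "extract", "scrape", "summarization"],
--         "file_system": ["file", "read", "write", "access", "manage", "directory"],
--         "local_rag": ["document", "extract", "text", "data", "parse", "summarize"],
--         "website_expert": ["expert", "knowledge", "specialist", "consult", "opinion"],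
--         "philosophical_reasoning": ["meaning", "life", "existence", "universe", "philosophy"],
--         "general_knowledge": ["what", "who", "where", "when", "why", "how", "explain", "define"],
--     }
--     t = task.lower()
--     best_skill = None
--     best_count = 0
--     for skill, keywords in skill_keywords.items():
--         match_count = sum(1 for kw in keywords if kw in t)
--         if match_count > best_count:
--             best_skill, best_count = skill, match_count
--     return best_skill
-- ===== Notes on version B (the rewrite author's own statement) =====
-- stated objective: simpler
-- what changed: Replaced build-matched-list + stable sort + tie-break scan with a single-pass running argmax (strict > keeps the first skill among ties, exactly A's stable-sort behaviour); no intermediate list, no sort.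
import Mathlib
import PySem

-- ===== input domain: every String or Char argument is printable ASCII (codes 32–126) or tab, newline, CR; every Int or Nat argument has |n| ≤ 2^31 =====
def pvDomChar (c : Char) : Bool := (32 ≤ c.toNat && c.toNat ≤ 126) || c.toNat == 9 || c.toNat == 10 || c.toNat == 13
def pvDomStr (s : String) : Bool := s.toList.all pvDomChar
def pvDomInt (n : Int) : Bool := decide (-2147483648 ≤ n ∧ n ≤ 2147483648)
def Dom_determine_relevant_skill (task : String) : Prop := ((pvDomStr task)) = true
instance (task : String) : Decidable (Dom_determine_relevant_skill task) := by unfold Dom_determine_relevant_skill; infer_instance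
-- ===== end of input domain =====

-- B replaces A's build-list / stable-sort / tie-break with a single-pass running argmax (simpler, no sort).

-- ===== PORT A =====
-- shared data: the literal skill_keywords table (insertion order of the Python dict)
def skillKeywords : List (String × List String) :=
  [("web_search", ["search", "find", "lookup", "query", "internet", "google", "information", "research"]),
   ("website_rag", ["website", "webpage", "content", "extract", "scrape", "summarization"]),
   ("file_system", ["file", "read", "write", "access", "manage", "directory"]),
   ("local_rag", ["document", "extract", "text", "data", "parse", "summarize"]),
   ("website_expert", ["expert", "knowledge", "specialist", "consult", "opinion"]),
   ("philosophical_reasoning", ["meaning", "life", "existence", "universe", "philosophy"]),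
   ("general_knowledge", ["what", "who", "where", "when", "why", "how", "explain", "define"])]

def determine_relevant_skill (task : String) : Option String :=
  let tl := PySem.Str.lower task
  -- for skill, keywords in skill_keywords.items(): if match_count > 0: matched_skills.append(...)
  let matched : List (String × Int) :=
    skillKeywords.foldl (fun acc p =>
      let mc : Int := (p.2.map (fun kw => if PySem.Str.isIn kw tl then (1 : Int) else 0)).sum
      if mc > 0 then acc ++ [(p.1, mc)] else acc) []
  if matched = [] then none
  else
    -- matched_skills.sort(key=lambda item: item[1], reverse=True)
    let ms := PySem.List.sorted matched (fun item => item.2) true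
    match ms with
    | [] => none                        -- unreachable (matched ≠ []); totalizes the [0]/[1] indexing
    | [m0] => some m0.1                 -- len(matched_skills) = 1: return matched_skills[0][0]
    | m0 :: m1 :: _ =>
      if m0.2 = m1.2 then
        -- tie-breaker: next((skill for skill, _ in matched_skills if skill in priority_order), None)
        let priority := skillKeywords.map (fun p => p.1)
        match ms.find? (fun p => priority.contains p.1) with
        | some p => some p.1
        | none => none
      else some m0.1                    -- return matched_skills[0][0]

-- ===== PORT B =====
def determine_relevant_skill_alt (task : String) : Option String :=
  let tl := PySem.Str.lower task
  (skillKeywords.foldl (fun (st : Option String × Int) p =>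
      let mc : Int := (p.2.countP (fun kw => PySem.Str.isIn kw tl) : Nat)
      if mc > st.2 then (some p.1, mc) else st)
    ((none : Option String), (0 : Int))).1

-- ===== PRECONDITION & SPEC =====
def Spec_determine_relevant_skill (task : String) (out : Option String) : Prop := out = determine_relevant_skill_alt task
instance (task : String) (out : Option String) : Decidable (Spec_determine_relevant_skill task out) := by unfold Spec_determine_relevant_skill; infer_instance

-- ===== CLAIM (what is proved, stated in full; the proofs are below) =====
def Claim_equal_determine_relevant_skill : Prop := ∀ (task : String), Dom_determine_relevant_skill task → Spec_determine_relevant_skill task (determine_relevant_skill task)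

-- ===== LEMMAS AND PROOFS =====

-- B's loop step, abstracted over an already-counted list of (skill, count) pairs
def bStep (st : Option String × Int) (p : String × Int) : Option String × Int :=
  if p.2 > st.2 then (some p.1, p.2) else st

-- entries with non-positive count never change B's state (its count stays ≥ 0)
theorem bFold_filter_pos (l : List (String × Int)) (st : Option String × Int) (h : 0 ≤ st.2) :
    l.foldl bStep st = (l.filter (fun p => decide (0 < p.2))).foldl bStep st := by
  induction l generalizing st with
  | nil => rfl
  | cons p t ih =>
    by_cases hp : 0 < p.2
    · simp only [List.filter_cons, hp, decide_true, List.foldl_cons]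
      apply ih
      unfold bStep
      split
      · exact le_of_lt hp
      · exact h
    · simp only [List.filter_cons, (by simpa using hp : decide (0 < p.2) = false), List.foldl_cons]
      have : bStep st p = st := by unfold bStep; split <;> [omega; rfl]
      rw [this]; exact ih st h

theorem insertBy_cons {α : Type} (bf : α → α → Bool) (x y : α) (ys : List α) :
    PySem.List.insertBy bf x (y :: ys) =
      if bf x y then x :: y :: ys else y :: PySem.List.insertBy bf x ys := rfl

-- B's running strict-> argmax over positive-count pairs = head of Python's stable descending sort
theorem bFold_eq_sorted_head (M : List (String × Int)) (hpos : ∀ p ∈ M, 0 < p.2) :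
    M.foldl bStep ((none : Option String), (0 : Int)) =
      (match PySem.List.sorted M (fun item => item.2) true with
       | [] => ((none : Option String), (0 : Int))
       | m :: _ => (some m.1, m.2)) := by
  induction M using List.reverseRecOn with
  | nil => simp [PySem.List.sorted]
  | append_singleton t x ih =>
    have hx : 0 < x.2 := hpos x (by simp)
    have ht : ∀ p ∈ t, 0 < p.2 := fun p hp => hpos p (by simp [hp])
    have hst : PySem.List.sorted (t ++ [x]) (fun item => item.2) true
        = PySem.List.insertBy (fun a b => decide (b.2 < a.2)) x
            (PySem.List.sorted t (fun item => item.2) true) := by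
      rw [PySem.List.sorted_rev_eq_foldl_insertBy, PySem.List.sorted_rev_eq_foldl_insertBy,
          List.foldl_append, List.foldl_cons, List.foldl_nil]
    rw [List.foldl_append, List.foldl_cons, List.foldl_nil, ih ht, hst]
    cases hs : PySem.List.sorted t (fun item => item.2) true with
    | nil => simp [bStep, hx, PySem.List.insertBy]
    | cons m rest =>
      rw [insertBy_cons]
      by_cases hcmp : m.2 < x.2
      · simp [bStep, hcmp]
      · have : decide (m.2 < x.2) = false := by simpa using hcmp
        simp only [this, Bool.false_eq_true, if_false]
        have : bStep (some m.1, m.2) x = (some m.1, m.2) := by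
          unfold bStep; split <;> [omega; rfl]
        rw [this]

-- A's sum of booleans is B's countP
theorem mc_eq (tl : String) (kws : List String) :
    (kws.map (fun kw => if PySem.Str.isIn kw tl then (1 : Int) else 0)).sum
      = ((kws.countP (fun kw => PySem.Str.isIn kw tl) : Nat) : Int) :=
  PySem.List.sum_map_ite_one_zero _ _

-- ===== VERDICT (by name: the statement is the Claim_ definition above) =====
theorem determine_relevant_skill_spec : Claim_equal_determine_relevant_skill := by
  intro task _
  unfold Spec_determine_relevant_skill determine_relevant_skill determine_relevant_skill_alt
  set tl := PySem.Str.lower task with htl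
  -- name the per-skill count and the counted list
  set cnt : List String → Int := fun kws => ((kws.countP (fun kw => PySem.Str.isIn kw tl) : Nat) : Int) with hcnt
  have hcnt_nonneg : ∀ kws, 0 ≤ cnt kws := by intro kws; simp [hcnt]
  -- A's matched list is the filtered counted list
  have hA : (skillKeywords.foldl (fun acc p =>
        let mc : Int := (p.2.map (fun kw => if PySem.Str.isIn kw tl then (1 : Int) else 0)).sum
        if mc > 0 then acc ++ [(p.1, mc)] else acc) [])
      = ((skillKeywords.map (fun p => (p.1, cnt p.2))).filter (fun p => decide (0 < p.2))) := by
    have := PySem.List.foldl_append_if (l := skillKeywords)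
      (p := fun p => decide (0 < cnt p.2)) (f := fun p => (p.1, cnt p.2)) (acc := [])
    simp only [List.nil_append] at this
    rw [show (fun (acc : List (String × Int)) (p : String × List String) =>
        let mc : Int := (p.2.map (fun kw => if PySem.Str.isIn kw tl then (1 : Int) else 0)).sum
        if mc > 0 then acc ++ [(p.1, mc)] else acc)
      = (fun acc p => if (fun p => decide (0 < cnt p.2)) p then acc ++ [(fun p => (p.1, cnt p.2)) p] else acc) by
        funext acc p; simp only [mc_eq, hcnt, gt_iff_lt, decide_eq_true_eq]]
    rw [this, List.filter_map]
    simp [Function.comp_def]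
  -- B's fold is bStep over the counted list
  have hB : (skillKeywords.foldl (fun (st : Option String × Int) p =>
        let mc : Int := (p.2.countP (fun kw => PySem.Str.isIn kw tl) : Nat)
        if mc > st.2 then (some p.1, mc) else st) ((none : Option String), (0 : Int)))
      = (skillKeywords.map (fun p => (p.1, cnt p.2))).foldl bStep ((none : Option String), (0 : Int)) := by
    rw [List.foldl_map]; rfl
  simp only [hA, hB]
  set l := skillKeywords.map (fun p => (p.1, cnt p.2)) with hl
  set M := l.filter (fun p => decide (0 < p.2)) with hM
  have hMpos : ∀ p ∈ M, 0 < p.2 := by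
    intro p hp; rw [hM, List.mem_filter] at hp; simpa using hp.2
  -- B over l = B over M = head of sorted M
  rw [bFold_filter_pos l _ (by norm_num), ← hM, bFold_eq_sorted_head M hMpos]
  -- every matched name is a key of the table, so the tie-break find? returns the head
  have hname : ∀ p ∈ M, p.1 ∈ skillKeywords.map (fun p => p.1) := by
    intro p hp
    rw [hM, List.mem_filter] at hp
    rw [hl, List.mem_map] at hp
    obtain ⟨⟨q, hq, rfl⟩, -⟩ := hp
    exact List.mem_map.mpr ⟨q, hq, rfl⟩
  by_cases hMnil : M = []
  · simp [hMnil, PySem.List.sorted]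
  · simp only [hMnil, if_false]
    cases hs : PySem.List.sorted M (fun item => item.2) true with
    | nil => rw [PySem.List.sorted_eq_nil_iff] at hs
    | cons m0 rest =>
      have hm0 : m0.1 ∈ skillKeywords.map (fun p => p.1) := by
        apply hname
        have : m0 ∈ PySem.List.sorted M (fun item => item.2) true := by rw [hs]; simp
        rwa [PySem.List.mem_sorted] at this
      cases rest with
      | nil => simp
      | cons m1 rest' =>
        by_cases htie : m0.2 = m1.2
        · simp [htie, List.find?, hm0]
        · simp [htie]
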